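/- GENERATED by tools/from_farm_form.py from prooffarm-gif/accepted/DGifGetWord.1/Proof.lean (a worked proof of the farm's unit `DGifGetWord.1`,
   accepted by the verdict) — do not edit. -/
import Gif.Spec.Units.DGifGetWord_1
import Gif.Spec.AllSegs
import Gif.Spec.Proved.DGifGetWord_1_Lemmas

open X86 X86.User Asan ProgX.Base ProgX.Base.Spec Gif.Spec

/-!
  `DGifGetWord.1` (0x106063 … 0x10608c and 0x1060a0 … 0x1060c2, 19 instructions; dgif_lib.c:744-750): A BODY SEGMENT OF A PROTECTED
  FUNCTION WITH A CALL IN THE MIDDLE, the worked example of the body segments. The call's return address 0x106072 (`ret1`) is not a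
  cut of the design, so the unit makes it one of its own: a private assertion `gw1_AtRet1` (`Body` + what is live there) and two
  walks (Lemmas.lean), chained here. The recipe of each walk is in farm.gif/hints/protected_frame.md (BODY SEGMENT).
-/

/-- Segment 1 of `DGifGetWord` takes `Start` at 0x106063 to `Done` at 0x10608c. -/
theorem Gif.Spec.Proved.DGifGetWord_1_ok : Gif.Spec.DGifGetWord_1.Statement := by
  intro Lay hLay μ hμ u₀ hcode h_InternalRead h_asan_store4_noabort H rest frames F R e ret v hat
  -- the callee's contract for the frame list of the body (the own frame in front) and the request of 2 bytes
  have hir := h_InternalRead H rest (DGifGetWord.framesIn frames e) F R 2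
  -- 0x106063 … the call … 0x106072
  refine (Gif.Spec.DGifGetWord_1.gw1_seg_call Lay hLay μ hμ u₀ hcode H rest frames F R e ret hir v hat).trans ?_
  -- 0x106072 … 0x10608c
  intro v1 hv1
  exact Gif.Spec.DGifGetWord_1.gw1_seg_tail Lay hLay μ hμ u₀ hcode H rest frames F R e ret h_asan_store4_noabort v1 hv1
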